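-- pv_equiv track=rewrite | github.com/BigSickMind/frequency-analysis | logic/old/FrequencyMain.py | gssnr_analysis
-- ===== SOURCE A (Python) =====
-- def gssnr_analysis(gssnr_blocks):
--     gssnr_blocks = gssnr_blocks[6:]
--     flag = True
--     model = []
--     for i in range(1, len(gssnr_blocks)):
--         if not flag:
--             if gssnr_blocks[i] - gssnr_blocks[i - 1] <= 0:
--                 continue
--             elif gssnr_blocks[i] - gssnr_blocks[i - 1] > 0:
--                 model.append('min')
--                 flag = True
--         else:
--             if gssnr_blocks[i] - gssnr_blocks[i - 1] >= 0:
--                 continue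
--             elif gssnr_blocks[i] - gssnr_blocks[i - 1] < 0:
--                 model.append('max')
--                 flag = False
--     if len(model) >= 3 and model[0] == 'max' and model[1] == 'min' and model[len(model) - 1] == 'max':
--         return True
--     else:
--         return False
-- ===== SOURCE B (Python) =====
-- def gssnr_analysis(gssnr_blocks):
--     xs = gssnr_blocks[6:]
--     signs = [b > a for a, b in zip(xs, xs[1:]) if b != a]
--     seq = [True] + signs
--     changes = sum(x != y for x, y in zip(seq, seq[1:]))
--     return changes >= 3 and changes % 2 == 1
-- ===== Notes on version B (the rewrite author's own statement) =====
-- stated objective: simpler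
-- what changed: Replaced A's flag/model-list state machine over indices with a stateless pipeline: take the signs of the non-zero consecutive differences and count adjacent sign changes in true::signs; the result is just 'count >= 3 and count odd'.
import Mathlib
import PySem

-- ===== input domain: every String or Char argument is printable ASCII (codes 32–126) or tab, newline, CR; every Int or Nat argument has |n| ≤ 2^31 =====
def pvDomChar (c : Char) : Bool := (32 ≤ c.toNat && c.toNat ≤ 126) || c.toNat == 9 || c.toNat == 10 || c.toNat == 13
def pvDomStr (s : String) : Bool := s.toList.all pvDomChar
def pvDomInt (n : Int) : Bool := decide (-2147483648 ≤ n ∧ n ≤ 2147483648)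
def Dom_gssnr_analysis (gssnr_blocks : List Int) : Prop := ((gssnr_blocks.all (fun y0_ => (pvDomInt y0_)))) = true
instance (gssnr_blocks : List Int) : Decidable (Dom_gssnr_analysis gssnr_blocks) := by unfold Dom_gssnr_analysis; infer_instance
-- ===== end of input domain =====

-- B replaces A's flag/model state machine by a comprehension pipeline: signs of the
-- non-zero consecutive differences, then a count of adjacent sign changes in true::signs
-- (objective: simpler, same asymptotic cost).

-- ===== PORT A =====
-- loop body of A: state (flag, model), i-th step reads gssnr_blocks[i] and gssnr_blocks[i-1]
def gssnrStep (xs : List Int) (st : Bool × List String) (i : Int) : Bool × List String :=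
  if !st.1 then
    if PySem.List.pyGetD xs i 0 - PySem.List.pyGetD xs (i - 1) 0 ≤ 0 then st
    else (true, st.2 ++ ["min"])
  else
    if PySem.List.pyGetD xs i 0 - PySem.List.pyGetD xs (i - 1) 0 ≥ 0 then st
    else (false, st.2 ++ ["max"])

def gssnr_analysis (gssnr_blocks : List Int) : Bool :=
  let xs := PySem.List.slice gssnr_blocks (some 6) none
  let st := (PySem.List.pyRange 1 (xs.length : Int) 1).foldl (gssnrStep xs) (true, [])
  let model := st.2
  decide (model.length ≥ 3)
    && (PySem.List.pyGetD model 0 "" == "max")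
    && (PySem.List.pyGetD model 1 "" == "min")
    && (PySem.List.pyGetD model ((model.length : Int) - 1) "" == "max")

-- ===== PORT B =====
def gssnr_analysis_alt (gssnr_blocks : List Int) : Bool :=
  let xs := PySem.List.slice gssnr_blocks (some 6) none
  let signs := ((xs.zip (xs.drop 1)).filter (fun p => p.2 ≠ p.1)).map (fun p => decide (p.2 > p.1))
  let seq := true :: signs
  let changes := (seq.zip (seq.drop 1)).countP (fun p => p.1 != p.2)
  decide (changes ≥ 3 ∧ changes % 2 = 1)

-- ===== PRECONDITION & SPEC =====
def Spec_gssnr_analysis (gssnr_blocks : List Int) (out : Bool) : Prop := out = gssnr_analysis_alt gssnr_blocks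
instance (gssnr_blocks : List Int) (out : Bool) : Decidable (Spec_gssnr_analysis gssnr_blocks out) := by unfold Spec_gssnr_analysis; infer_instance

-- ===== CLAIM (what is proved, stated in full; the proofs are below) =====
def Claim_equal_gssnr_analysis : Prop := ∀ (gssnr_blocks : List Int), Dom_gssnr_analysis gssnr_blocks → Spec_gssnr_analysis gssnr_blocks (gssnr_analysis gssnr_blocks)

-- ===== LEMMAS AND PROOFS =====

-- the alternating model list A builds: "max","min","max",…
def altModel (n : Nat) : List String :=
  (List.range n).map (fun i => if i % 2 = 0 then "max" else "min")

-- run/turning-point counter: prev direction is encoded as the parity of n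
def crec (n : Nat) : List Bool → Nat
  | [] => n
  | s :: ss => if s = decide (n % 2 = 0) then crec n ss else crec (n + 1) ss

-- sign list of a pair list (B's comprehension, on pairs)
def sgn (ps : List (Int × Int)) : List Bool :=
  (ps.filter (fun p => p.2 ≠ p.1)).map (fun p => decide (p.2 > p.1))

-- A's loop body re-expressed on the pair (a, b) = (xs[i-1], xs[i])
def stepPair (st : Bool × List String) (p : Int × Int) : Bool × List String :=
  if !st.1 then
    if p.2 - p.1 ≤ 0 then st else (true, st.2 ++ ["min"])
  else
    if p.2 - p.1 ≥ 0 then st else (false, st.2 ++ ["max"])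

theorem parity_flip (n : Nat) : decide ((n + 1) % 2 = 0) = !decide (n % 2 = 0) := by
  rcases Nat.mod_two_eq_zero_or_one n with h | h <;> simp [Nat.add_mod, h]

theorem altModel_succ (n : Nat) :
    altModel (n + 1) = altModel n ++ [if n % 2 = 0 then "max" else "min"] := by
  simp [altModel, List.range_succ]

-- generic: a foldl over range(len l) reading l.getD j is a foldl over l
theorem foldl_range_getD {α σ : Type} (l : List α) (d : α) (f : σ → α → σ) (init : σ) :
    (List.range l.length).foldl (fun st j => f st (l.getD j d)) init = l.foldl f init := by
  induction l using List.reverseRecOn generalizing init with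
  | nil => simp
  | append_singleton l x ih =>
      simp only [List.length_append, List.length_singleton, List.range_succ, List.foldl_append,
        List.foldl_cons, List.foldl_nil]
      have hbody : (List.range l.length).foldl (fun st j => f st ((l ++ [x]).getD j d)) init
          = (List.range l.length).foldl (fun st j => f st (l.getD j d)) init := by
        apply PySem.List.foldl_congr_mem
        intro acc j hj
        simp only [List.mem_range] at hj
        have hlt : j < (l ++ [x]).length := by simp; omega
        rw [List.getD_eq_getElem _ _ hlt, List.getD_eq_getElem _ _ hj]
        simp [hj]
      have hlast : (l ++ [x]).getD l.length d = x := by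
        rw [List.getD_append_right _ _ _ _ (le_refl _)]
        simp
      rw [hbody, ih, hlast]

theorem foldl_range_pairs {σ : Type} (xs : List Int) (f : σ → Int × Int → σ) (init : σ) :
    (List.range (xs.length - 1)).foldl
        (fun st j => f st (xs.getD j 0, xs.getD (j + 1) 0)) init
      = (xs.zip (xs.drop 1)).foldl f init := by
  have hlen : (xs.zip (xs.drop 1)).length = xs.length - 1 := by
    simp [List.length_zip]
  rw [← foldl_range_getD (xs.zip (xs.drop 1)) (0, 0) f init, hlen]
  apply PySem.List.foldl_congr_mem
  intro acc j hj
  simp only [List.mem_range] at hj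
  have hj1 : j < (xs.zip (xs.drop 1)).length := by omega
  have hjx : j < xs.length := by omega
  have hjx1 : j + 1 < xs.length := by omega
  rw [List.getD_eq_getElem _ _ hj1, List.getElem_zip,
      List.getD_eq_getElem _ _ hjx, List.getD_eq_getElem _ _ hjx1]
  simp

-- A's range-indexed fold equals the pair fold
theorem foldA_pairs (xs : List Int) (init : Bool × List String) :
    (PySem.List.pyRange 1 (xs.length : Int) 1).foldl (gssnrStep xs) init
      = (xs.zip (xs.drop 1)).foldl stepPair init := by
  rw [PySem.List.pyRange_one, List.foldl_map, ← foldl_range_pairs xs stepPair init]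
  have hcast : ((xs.length : Int) - 1).toNat = xs.length - 1 := by omega
  rw [hcast]
  apply PySem.List.foldl_congr_mem
  intro acc j hj
  simp only [List.mem_range] at hj
  have h2 : (1 : Int) + (j : Int) = (((j + 1 : Nat)) : Int) := by push_cast; ring
  have h1 : (((j + 1 : Nat)) : Int) - 1 = ((j : Nat) : Int) := by push_cast; ring
  simp only [gssnrStep, stepPair, h2, h1, PySem.List.pyGetD_natCast]

-- the invariant of A's loop: state is (parity of n, altModel n), advanced by crec
theorem loopA (ps : List (Int × Int)) : ∀ n : Nat,
    ps.foldl stepPair (decide (n % 2 = 0), altModel n)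
      = (decide (crec n (sgn ps) % 2 = 0), altModel (crec n (sgn ps))) := by
  induction ps with
  | nil => intro n; simp [sgn, crec]
  | cons p ps ih =>
      intro n
      obtain ⟨a, b⟩ := p
      by_cases hab : b = a
      · have hstep : stepPair (decide (n % 2 = 0), altModel n) (a, b)
            = (decide (n % 2 = 0), altModel n) := by
          simp [stepPair, hab]
        have hsgn : sgn ((a, b) :: ps) = sgn ps := by
          simp [sgn, hab]
        rw [List.foldl_cons, hstep, ih n, hsgn]
      · have hsgn : sgn ((a, b) :: ps) = decide (b > a) :: sgn ps := by
          simp [sgn, hab]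
        rw [List.foldl_cons, hsgn]
        by_cases hba : b > a
        · simp only [hba, decide_true]
          by_cases hpar : n % 2 = 0
          · -- flag = true (prev up): upward move skipped
            have hstep : stepPair (decide (n % 2 = 0), altModel n) (a, b)
                = (decide (n % 2 = 0), altModel n) := by
              simp only [stepPair, hpar, decide_true, Bool.not_true, Bool.false_eq_true,
                if_false]
              rw [if_pos (by omega)]
            have hc : crec n (true :: sgn ps) = crec n (sgn ps) := by
              simp [crec, hpar]
            rw [hstep, ih n, hc]
          · -- flag = false: append "min", count + 1
            have hP : decide (n % 2 = 0) = false := by simp [hpar]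
            have hstep : stepPair (decide (n % 2 = 0), altModel n) (a, b)
                = (decide ((n + 1) % 2 = 0), altModel (n + 1)) := by
              simp only [stepPair, hP, Bool.not_false, if_true]
              rw [if_neg (by omega), altModel_succ, if_neg hpar, parity_flip, hP]
              rfl
            have hc : crec n (true :: sgn ps) = crec (n + 1) (sgn ps) := by
              simp [crec, hP]
            rw [hstep, ih (n + 1), hc]
        · have hlt : b < a := by omega
          have hdb : decide (b > a) = false := by simp [hba]
          rw [hdb]
          by_cases hpar : n % 2 = 0
          · -- flag = true: append "max", count + 1
            have hstep : stepPair (decide (n % 2 = 0), altModel n) (a, b)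
                = (decide ((n + 1) % 2 = 0), altModel (n + 1)) := by
              simp only [stepPair, hpar, decide_true, Bool.not_true, Bool.false_eq_true,
                if_false]
              rw [if_neg (by omega), altModel_succ, if_pos hpar, parity_flip]
              simp [hpar]
            have hc : crec n (false :: sgn ps) = crec (n + 1) (sgn ps) := by
              simp [crec, hpar]
            rw [hstep, ih (n + 1), hc]
          · -- flag = false (prev down): downward move skipped
            have hP : decide (n % 2 = 0) = false := by simp [hpar]
            have hstep : stepPair (decide (n % 2 = 0), altModel n) (a, b)
                = (decide (n % 2 = 0), altModel n) := by
              simp only [stepPair, hP, Bool.not_false, if_true]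
              rw [if_pos (by omega)]
            have hc : crec n (false :: sgn ps) = crec n (sgn ps) := by
              simp [crec, hP]
            rw [hstep, ih n, hc]

-- crec counts the adjacent changes of prev :: l (B's count)
theorem crec_changes (l : List Bool) : ∀ n : Nat,
    crec n l = n + ((decide (n % 2 = 0) :: l).zip l).countP (fun p => p.1 != p.2) := by
  induction l with
  | nil => intro n; simp [crec]
  | cons s ss ih =>
      intro n
      by_cases hs : s = decide (n % 2 = 0)
      · rw [crec, if_pos hs, ih n, hs]
        simp [List.zip_cons_cons]
      · rw [crec, if_neg hs, ih (n + 1)]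
        have hflip : s = !decide (n % 2 = 0) := by
          cases s <;> cases hP : decide (n % 2 = 0) <;> simp_all
        simp only [List.zip_cons_cons, List.countP_cons]
        rw [parity_flip, ← hflip]
        have hne : (decide (n % 2 = 0) != s) = true := by
          rw [hflip]; cases decide (n % 2 = 0) <;> rfl
        rw [hne, if_pos rfl]
        omega

-- altModel lookups
theorem altModel_length (n : Nat) : (altModel n).length = n := by simp [altModel]

theorem altModel_getD (n k : Nat) (hk : k < n) :
    (altModel n).getD k "" = (if k % 2 = 0 then "max" else "min") := by
  simp [altModel, List.getD_eq_getElem?_getD, hk]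

theorem sgn_eq_signs (xs : List Int) :
    sgn (xs.zip (xs.drop 1))
      = ((xs.zip (xs.drop 1)).filter (fun p => p.2 ≠ p.1)).map (fun p => decide (p.2 > p.1)) := rfl

-- A's final test on altModel N reduces to N ≥ 3 ∧ N odd
theorem final_cond (N : Nat) :
    (decide ((altModel N).length ≥ 3)
      && (PySem.List.pyGetD (altModel N) 0 "" == "max")
      && (PySem.List.pyGetD (altModel N) 1 "" == "min")
      && (PySem.List.pyGetD (altModel N) (((altModel N).length : Int) - 1) "" == "max"))
    = decide (N ≥ 3 ∧ N % 2 = 1) := by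
  by_cases hN : N ≥ 3
  · have h0 : PySem.List.pyGetD (altModel N) 0 "" = "max" := by
      have : ((0 : Int)) = ((0 : Nat) : Int) := rfl
      rw [this, PySem.List.pyGetD_natCast, altModel_getD N 0 (by omega)]
      simp
    have h1 : PySem.List.pyGetD (altModel N) 1 "" = "min" := by
      have : ((1 : Int)) = ((1 : Nat) : Int) := rfl
      rw [this, PySem.List.pyGetD_natCast, altModel_getD N 1 (by omega)]
      simp
    have hlast : PySem.List.pyGetD (altModel N) (((altModel N).length : Int) - 1) ""
        = (if (N - 1) % 2 = 0 then "max" else "min") := by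
      rw [altModel_length]
      have hc : ((N : Int) - 1) = ((N - 1 : Nat) : Int) := by omega
      rw [hc, PySem.List.pyGetD_natCast, altModel_getD N (N - 1) (by omega)]
    rw [h0, h1, hlast, altModel_length]
    by_cases hodd : N % 2 = 1
    · have : (N - 1) % 2 = 0 := by omega
      simp [this, hN, hodd]
    · have : (N - 1) % 2 ≠ 0 := by omega
      simp [this, hN, hodd]
  · rw [altModel_length]
    simp [hN]

-- ===== VERDICT (by name: the statement is the Claim_ definition above) =====
theorem gssnr_analysis_spec : Claim_equal_gssnr_analysis := by
  intro gssnr_blocks _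
  unfold Spec_gssnr_analysis gssnr_analysis gssnr_analysis_alt
  set xs := PySem.List.slice gssnr_blocks (some 6) none with hxs
  have hA : (PySem.List.pyRange 1 (xs.length : Int) 1).foldl (gssnrStep xs) (true, [])
      = (decide (crec 0 (sgn (xs.zip (xs.drop 1))) % 2 = 0),
         altModel (crec 0 (sgn (xs.zip (xs.drop 1))))) := by
    rw [foldA_pairs]
    have := loopA (xs.zip (xs.drop 1)) 0
    simpa [altModel] using this
  simp only [hA]
  set N := crec 0 (sgn (xs.zip (xs.drop 1))) with hN
  have hfin := final_cond N
  rw [hfin]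
  have hcnt := crec_changes (sgn (xs.zip (xs.drop 1))) 0
  simp only [Nat.zero_mod, decide_true, Nat.zero_add] at hcnt
  rw [← hN] at hcnt
  simp only [List.drop_succ_cons, List.drop_zero]
  rw [hcnt, sgn_eq_signs]
  rfl
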